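-- pv_equiv track=rewrite | github.com/alejandroRdzGarza/final_great_agent_hackaton | Track_C/3_data_processing/label_messages.py | label_messages
-- ===== SOURCE A (Python) =====
-- def label_messages(final_messages, jailbreak_message_num):
--     """Label messages: 0 before jailbreak, 1 from jailbreak point onwards.
--
--     If jailbreak_message_num points to a user message, we label from that point.
--     If it points to an assistant message, we label from that point.
--     """
--     labels = []
--     for i, msg in enumerate(final_messages, start=1):
--         if i < jailbreak_message_num or jailbreak_message_num == 0:
--             labels.append(0)
--         else:
--             labels.append(1)
--     return labels
-- ===== SOURCE B (Python) =====
-- def label_messages(final_messages, jailbreak_message_num):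
--     n = len(final_messages)
--     if jailbreak_message_num == 0:
--         zeros = n
--     else:
--         zeros = max(0, min(jailbreak_message_num - 1, n))
--     return [0] * zeros + [1] * (n - zeros)
-- ===== Notes on version B (the rewrite author's own statement) =====
-- stated objective: simpler
-- what changed: Replaces the per-element conditional loop with an arithmetic computation of the zero/one boundary and construction of two constant runs via list repetition.
import Mathlib
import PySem

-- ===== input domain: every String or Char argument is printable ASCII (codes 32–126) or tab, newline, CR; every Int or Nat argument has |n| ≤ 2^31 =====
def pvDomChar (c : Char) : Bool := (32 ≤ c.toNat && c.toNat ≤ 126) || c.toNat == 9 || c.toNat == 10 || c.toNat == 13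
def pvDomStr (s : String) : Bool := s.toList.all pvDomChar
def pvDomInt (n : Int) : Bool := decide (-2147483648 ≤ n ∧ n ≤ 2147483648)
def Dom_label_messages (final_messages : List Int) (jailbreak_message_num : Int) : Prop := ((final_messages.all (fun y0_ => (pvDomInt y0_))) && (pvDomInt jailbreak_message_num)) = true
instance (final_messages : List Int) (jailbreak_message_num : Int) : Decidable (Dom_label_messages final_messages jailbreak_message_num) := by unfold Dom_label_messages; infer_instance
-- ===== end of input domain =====

-- B replaces A's per-element conditional loop by an arithmetic boundary computation
-- and two constant runs (objective: simpler).


-- ===== PORT A =====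
-- the loop `for i, msg in enumerate(final_messages, start=1)` appending one label
-- per message, as structural recursion carrying the 1-based counter i
def labelLoopA (final_messages : List Int) (i jailbreak_message_num : Int) : List Int :=
  match final_messages with
  | [] => []
  | _msg :: rest =>
      (if i < jailbreak_message_num ∨ jailbreak_message_num = 0 then (0 : Int) else 1)
        :: labelLoopA rest (i + 1) jailbreak_message_num

def label_messages (final_messages : List Int) (jailbreak_message_num : Int) : List Int :=
  labelLoopA final_messages 1 jailbreak_message_num

-- ===== PORT B =====
def label_messages_alt (final_messages : List Int) (jailbreak_message_num : Int) : List Int :=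
  let n : Int := final_messages.length
  let zeros : Int :=
    if jailbreak_message_num = 0 then n
    else max 0 (min (jailbreak_message_num - 1) n)
  List.replicate zeros.toNat 0 ++ List.replicate (n - zeros).toNat 1

-- ===== PRECONDITION & SPEC =====
def Spec_label_messages (final_messages : List Int) (jailbreak_message_num : Int) (out : List Int) : Prop := out = label_messages_alt final_messages jailbreak_message_num
instance (final_messages : List Int) (jailbreak_message_num : Int) (out : List Int) : Decidable (Spec_label_messages final_messages jailbreak_message_num out) := by unfold Spec_label_messages; infer_instance

-- ===== CLAIM (what is proved, stated in full; the proofs are below) =====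
def Claim_equal_label_messages : Prop := ∀ (final_messages : List Int) (jailbreak_message_num : Int), Dom_label_messages final_messages jailbreak_message_num → Spec_label_messages final_messages jailbreak_message_num (label_messages final_messages jailbreak_message_num)

-- ===== LEMMAS AND PROOFS =====

theorem labelLoopA_eq (final_messages : List Int) (j : Int) : ∀ i : Int,
    labelLoopA final_messages i j =
      if j = 0 then List.replicate final_messages.length 0
      else
        List.replicate (min (j - i) (final_messages.length : Int)).toNat 0 ++
          List.replicate (final_messages.length - (min (j - i) (final_messages.length : Int)).toNat) 1 := by
  induction final_messages with
  | nil => intro i; simp [labelLoopA]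
  | cons x xs ih =>
      intro i
      by_cases hj : j = 0
      · subst hj; simp [labelLoopA, ih (i + 1), List.replicate_succ]
      · by_cases hi : i < j
        · have hz : (min (j - i) ((xs.length : Int) + 1)).toNat
              = (min (j - (i + 1)) ((xs.length : Int))).toNat + 1 := by omega
          have hn : xs.length + 1 - ((min (j - (i + 1)) ((xs.length : Int))).toNat + 1)
              = xs.length - (min (j - (i + 1)) ((xs.length : Int))).toNat := by omega
          simp [labelLoopA, hi, ih (i + 1), hj, hz, hn, List.replicate_succ]
        · have hz : (min (j - i) ((xs.length : Int) + 1)).toNat = 0 := by omega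
          have hz' : (min (j - (i + 1)) ((xs.length : Int))).toNat = 0 := by omega
          simp [labelLoopA, ih (i + 1), hj, hz, hz', hi, List.replicate_succ]

-- ===== VERDICT (by name: the statement is the Claim_ definition above) =====
theorem label_messages_spec : Claim_equal_label_messages := by
  intro fm j _
  unfold Spec_label_messages label_messages label_messages_alt
  rw [labelLoopA_eq fm j 1]
  by_cases hj : j = 0
  · simp [hj]
  · have hz : (max 0 (min (j - 1) (fm.length : Int))).toNat
        = (min (j - 1) (fm.length : Int)).toNat := by omega
    have h2 : ((fm.length : Int) - max 0 (min (j - 1) (fm.length : Int))).toNat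
        = fm.length - (min (j - 1) (fm.length : Int)).toNat := by omega
    simp only [if_neg hj, hz, h2]
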